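-- pv_equiv track=rewrite | github.com/nluu175/aoc-2025 | day4/p2.py | remove_accessible_rolls
-- ===== SOURCE A (Python) =====
-- def is_able_to_access(board, i, j) -> bool:
--     if board[i][j] != "@":
--         return False
--
--     rows = len(board)
--     cols = len(board[0])
--
--     # Define the 8 directions (neighbors)
--     directions = [
--         (-1, -1),   # top-left
--         (-1, 0),    # top
--         (-1, 1),    # top-right
--         (0, -1),    # left
--         (0, 1),     # right
--         (1, -1),    # bot-left
--         (1, 0),     # bot
--         (1, 1),     # bot-right
--     ]
--
--     count = 0
--     for di, dj in directions:
--         ni, nj = i + di, j + dj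
--         if 0 <= ni < rows and 0 <= nj < cols:
--             if board[ni][nj] == "@":
--                 count += 1
--                 if count >= 4:  # early access to reduce the number of checks
--                     return False
--
--     return count < 4
--
-- def remove_accessible_rolls(board):
--     rows = len(board)
--     cols = len(board[0])
--
--     # identify which rolls to remove
--     to_remove = []
--     for i in range(rows):
--         for j in range(cols):
--             if is_able_to_access(board, i, j):
--                 to_remove.append((i, j))
--
--     # remove them
--     for i, j in to_remove:
--         board[i][j] = "."
--
--     return len(to_remove)
-- ===== SOURCE B (Python) =====
-- DIRS = [(-1, -1), (-1, 0), (-1, 1), (0, -1), (0, 1), (1, -1), (1, 0), (1, 1)]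
--
-- def remove_accessible_rolls(board):
--     rows = len(board)
--     cols = len(board[0])
--     # scatter pass: every '@' cell adds +1 at each of its 8 neighbor positions
--     contribs = [(i + di, j + dj)
--                 for i in range(rows) for j in range(cols)
--                 if board[i][j] == "@"
--                 for di, dj in DIRS]
--     counts = {}
--     for p in contribs:
--         counts[p] = counts.get(p, 0) + 1
--     # removal pass: an '@' cell with fewer than 4 scattered contributions goes
--     removed = 0
--     for i in range(rows):
--         for j in range(cols):
--             if board[i][j] == "@" and counts.get((i, j), 0) < 4:
--                 board[i][j] = "."
--                 removed += 1
--     return removed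
-- ===== Notes on version B (the rewrite author's own statement) =====
-- stated objective: alternative
-- what changed: A's per-cell gather helper (re-scanning the 8 neighbors of every cell, with an early exit) is replaced by a scatter pass that builds a neighbor-count table once (each '@' cell adds +1 at its 8 neighbor positions in a dict) followed by a pass that counts/removes the '@' cells whose table entry is below 4.
import Mathlib
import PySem

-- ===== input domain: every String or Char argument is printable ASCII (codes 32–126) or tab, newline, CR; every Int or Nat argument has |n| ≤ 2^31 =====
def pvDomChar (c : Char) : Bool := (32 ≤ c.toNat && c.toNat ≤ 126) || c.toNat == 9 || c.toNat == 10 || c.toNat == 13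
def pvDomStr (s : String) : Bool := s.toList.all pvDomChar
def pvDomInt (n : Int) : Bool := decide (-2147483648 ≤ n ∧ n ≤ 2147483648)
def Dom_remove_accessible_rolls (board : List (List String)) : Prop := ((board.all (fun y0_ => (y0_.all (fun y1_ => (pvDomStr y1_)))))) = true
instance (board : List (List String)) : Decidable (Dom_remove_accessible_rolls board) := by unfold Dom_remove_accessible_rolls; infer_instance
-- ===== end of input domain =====

-- B replaces A's per-cell gather-and-count helper by a scatter pass that builds a neighbor-count
-- table (a dict) once, then counts the removable cells in a second pass (objective: alternative).
-- Both Pythons mutate `board` in place (removed cells become "."); the equivalence proved here is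
-- about the RETURN value only (the mutation itself is identical in A and B).

-- ===== PORT A =====
-- board[a][b] (both Pythons use the identical expression)
def cellAt (board : List (List String)) (a b : Int) : String :=
  PySem.List.pyGetD (PySem.List.pyGetD board a []) b ""

def directionsA : List (Int × Int) :=
  [(-1, -1), (-1, 0), (-1, 1), (0, -1), (0, 1), (1, -1), (1, 0), (1, 1)]

-- the 'for di, dj in directions' loop of is_able_to_access, with its early `return False`
def accessLoop (board : List (List String)) (rows cols i j : Int) :
    List (Int × Int) → Int → Bool
  | [], count => decide (count < 4)
  | d :: rest, count =>
      let ni := i + d.1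
      let nj := j + d.2
      if 0 ≤ ni ∧ ni < rows ∧ 0 ≤ nj ∧ nj < cols then
        if cellAt board ni nj = "@" then
          if count + 1 ≥ 4 then false
          else accessLoop board rows cols i j rest (count + 1)
        else accessLoop board rows cols i j rest count
      else accessLoop board rows cols i j rest count

def is_able_to_access (board : List (List String)) (i j : Int) : Bool :=
  if cellAt board i j ≠ "@" then false
  else
    accessLoop board (PySem.List.len board) (PySem.List.len (PySem.List.pyGetD board 0 []))
      i j directionsA 0

def remove_accessible_rolls (board : List (List String)) : Int :=
  let rows := PySem.List.len board
  let cols := PySem.List.len (PySem.List.pyGetD board 0 [])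
  let to_remove :=
    (PySem.List.pyRange 0 rows 1).foldl (fun acc i =>
      (PySem.List.pyRange 0 cols 1).foldl (fun acc j =>
        if is_able_to_access board i j then acc ++ [(i, j)] else acc) acc)
      ([] : List (Int × Int))
  (to_remove.length : Int)

-- ===== PORT B =====
def dirsB : List (Int × Int) :=
  [(-1, -1), (-1, 0), (-1, 1), (0, -1), (0, 1), (1, -1), (1, 0), (1, 1)]

def remove_accessible_rolls_alt (board : List (List String)) : Int :=
  let rows := PySem.List.len board
  let cols := PySem.List.len (PySem.List.pyGetD board 0 [])
  -- scatter pass: every '@' cell adds one contribution at each of its 8 neighbor positions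
  let contribs :=
    (PySem.List.pyRange 0 rows 1).flatMap (fun i =>
      (PySem.List.pyRange 0 cols 1).flatMap (fun j =>
        if cellAt board i j = "@" then dirsB.map (fun d => (i + d.1, j + d.2)) else []))
  let counts : PySem.Dict (Int × Int) Int :=
    contribs.foldl (fun d p => d.modify p 0 (· + 1)) PySem.Dict.empty
  -- removal pass: an '@' cell with fewer than 4 scattered contributions goes
  (PySem.List.pyRange 0 rows 1).foldl (fun acc i =>
    (PySem.List.pyRange 0 cols 1).foldl (fun acc j =>
      if cellAt board i j = "@" ∧ counts.getD (i, j) 0 < 4 then acc + 1 else acc) acc)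
    (0 : Int)

-- ===== PRECONDITION & SPEC =====
-- Pre_ excludes exactly the inputs where the Python raises IndexError: the empty board
-- (len(board[0])) and ragged boards whose later rows are shorter than row 0 (board[i][j]).
def Pre_remove_accessible_rolls (board : List (List String)) : Prop :=
  board ≠ [] ∧ ∀ r ∈ board, (board.headD []).length ≤ r.length
instance (board : List (List String)) : Decidable (Pre_remove_accessible_rolls board) := by
  unfold Pre_remove_accessible_rolls; infer_instance
def pvWitness_remove_accessible_rolls : List (List String) :=
  [["@", "@", "."], ["@", "@", "@"], [".", "@", "."]]

def Spec_remove_accessible_rolls (board : List (List String)) (out : Int) : Prop :=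
  out = remove_accessible_rolls_alt board
instance (board : List (List String)) (out : Int) :
    Decidable (Spec_remove_accessible_rolls board out) := by
  unfold Spec_remove_accessible_rolls; infer_instance

-- ===== CLAIM (what is proved, stated in full; the proofs are below) =====
def Claim_equal_remove_accessible_rolls : Prop :=
  ∀ (board : List (List String)), Dom_remove_accessible_rolls board →
    Pre_remove_accessible_rolls board →
    Spec_remove_accessible_rolls board (remove_accessible_rolls board)

-- ===== LEMMAS AND PROOFS =====

-- indicator: position (a,b) is on the board and holds '@'
def indOf (board : List (List String)) (rows cols a b : Int) : Int :=
  if 0 ≤ a ∧ a < rows ∧ 0 ≤ b ∧ b < cols ∧ cellAt board a b = "@" then 1 else 0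

theorem indOf_nonneg (board : List (List String)) (rows cols a b : Int) :
    0 ≤ indOf board rows cols a b := by
  unfold indOf; split <;> omega

-- A's early-exit direction loop computes `count + (number of '@' neighbors) < 4`
theorem accessLoop_eq (board : List (List String)) (rows cols i j : Int) :
    ∀ (l : List (Int × Int)) (c : Int),
      accessLoop board rows cols i j l c
        = decide (c + (l.map (fun d => indOf board rows cols (i + d.1) (j + d.2))).sum < 4) := by
  intro l
  induction l with
  | nil => intro c; simp [accessLoop]
  | cons d rest ih =>
      intro c
      have hS : 0 ≤ (rest.map (fun d => indOf board rows cols (i + d.1) (j + d.2))).sum := by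
        apply List.sum_nonneg
        intro x hx
        obtain ⟨d', _, rfl⟩ := List.mem_map.mp hx
        exact indOf_nonneg ..
      by_cases hb : 0 ≤ i + d.1 ∧ i + d.1 < rows ∧ 0 ≤ j + d.2 ∧ j + d.2 < cols
      · by_cases hc : cellAt board (i + d.1) (j + d.2) = "@"
        · have hind : indOf board rows cols (i + d.1) (j + d.2) = 1 := by
            unfold indOf; rw [if_pos ⟨hb.1, hb.2.1, hb.2.2.1, hb.2.2.2, hc⟩]
          by_cases h4 : c + 1 ≥ 4
          · simp only [accessLoop, if_pos hb, if_pos hc, if_pos h4, List.map_cons, List.sum_cons, hind]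
            symm; rw [decide_eq_false_iff_not]; omega
          · simp only [accessLoop, if_pos hb, if_pos hc, if_neg h4, List.map_cons, List.sum_cons,
              hind, ih]
            congr 1; rw [eq_iff_iff]; omega
        · have hind : indOf board rows cols (i + d.1) (j + d.2) = 0 := by
            unfold indOf; rw [if_neg]; tauto
          simp only [accessLoop, if_pos hb, if_neg hc, List.map_cons, List.sum_cons, hind, ih]
          congr 1; rw [eq_iff_iff]; omega
      · have hind : indOf board rows cols (i + d.1) (j + d.2) = 0 := by
          unfold indOf; rw [if_neg]; tauto
        simp only [accessLoop, if_neg hb, List.map_cons, List.sum_cons, hind, ih]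
        congr 1; rw [eq_iff_iff]; omega
theorem range_delta (m : Nat) (p : Int) (g : Int → Int) :
    ((List.range m).map (fun (k : Nat) => if (k : Int) = p then g (k : Int) else 0)).sum
      = if 0 ≤ p ∧ p < (m : Int) then g p else 0 := by
  induction m with
  | zero => simp
  | succ n ih =>
      rw [List.range_succ, List.map_append, List.sum_append, ih]
      by_cases hp : (n : Int) = p
      · rw [← hp]; simp
      · simp [hp]
        split_ifs <;> first | rfl | omega

theorem pr_delta (n p : Int) (g : Int → Int) :
    ((PySem.List.pyRange 0 n 1).map (fun a => if a = p then g a else 0)).sum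
      = if 0 ≤ p ∧ p < n then g p else 0 := by
  rw [PySem.List.pyRange_one, List.map_map]
  have : ((fun a => if a = p then g a else 0) ∘ fun (k : Nat) => (0:Int) + ↑k)
       = fun (k : Nat) => if (k : Int) = p then g (k : Int) else 0 := by
    funext k; simp
  rw [this, range_delta]
  by_cases h : 0 ≤ p ∧ p < n
  · rw [if_pos h, if_pos ⟨h.1, by omega⟩]
  · rw [if_neg h, if_neg (by omega)]
theorem count_flatMap {α β : Type} [BEq β] (l : List α) (f : α → List β) (b : β) :
    (l.flatMap f).count b = (l.map fun x => (f x).count b).sum := by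
  induction l with
  | nil => simp
  | cons x xs ih => simp [List.count_append, ih]

theorem cast_list_sum (l : List Nat) : ((l.sum : Nat) : Int) = (l.map (fun (n : Nat) => (n : Int))).sum := by
  induction l with
  | nil => simp
  | cons x xs ih => simp [ih]

-- exchange two list sums
theorem sum_swap {α β : Type} (l : List α) (m : List β) (g : α → β → Int) :
    (l.map (fun x => (m.map (g x)).sum)).sum = (m.map (fun y => (l.map (fun x => g x y)).sum)).sum := by
  induction l with
  | nil => simp [List.map_const']
  | cons x xs ih =>
      simp only [List.map_cons, List.sum_cons, ih]
      rw [← PySem.List.sum_map_add_int]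

-- the number of contributions B scatters onto position p = gather count at p
theorem count_contribs (board : List (List String)) (rows cols : Int) (p : Int × Int) :
    (((PySem.List.pyRange 0 rows 1).flatMap (fun i =>
        (PySem.List.pyRange 0 cols 1).flatMap (fun j =>
          if cellAt board i j = "@" then dirsB.map (fun d => (i + d.1, j + d.2)) else []))).count p : Int)
      = (dirsB.map (fun d => indOf board rows cols (p.1 - d.1) (p.2 - d.2))).sum := by
  calc (((PySem.List.pyRange 0 rows 1).flatMap (fun i =>
        (PySem.List.pyRange 0 cols 1).flatMap (fun j =>
          if cellAt board i j = "@" then dirsB.map (fun d => (i + d.1, j + d.2)) else []))).count p : Int)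
      = ((PySem.List.pyRange 0 rows 1).map (fun i =>
          ((PySem.List.pyRange 0 cols 1).map (fun j =>
            (dirsB.map (fun d =>
              if cellAt board i j = "@" ∧ (i + d.1, j + d.2) = p then (1:Int) else 0)).sum)).sum)).sum := by
        rw [count_flatMap, cast_list_sum, List.map_map]
        apply congrArg List.sum
        apply List.map_congr_left
        intro i _
        simp only [Function.comp_apply]
        rw [count_flatMap, cast_list_sum, List.map_map]
        apply congrArg List.sum
        apply List.map_congr_left
        intro j _
        simp only [Function.comp_apply]
        by_cases hc : cellAt board i j = "@"
        · rw [if_pos hc, List.count, List.countP_map]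
          rw [show ((fun x => x == p) ∘ fun (d : Int × Int) => (i + d.1, j + d.2))
              = (fun (d : Int × Int) => ((i + d.1, j + d.2) == p)) from rfl]
          rw [← PySem.List.sum_map_ite_one_zero (fun d => ((i + d.1, j + d.2) == p)) dirsB]
          apply congrArg List.sum
          apply List.map_congr_left
          intro d _
          simp [hc]
        · simp [hc]
    _ = ((PySem.List.pyRange 0 rows 1).map (fun i =>
          (dirsB.map (fun d =>
            ((PySem.List.pyRange 0 cols 1).map (fun j =>
              if cellAt board i j = "@" ∧ (i + d.1, j + d.2) = p then (1:Int) else 0)).sum)).sum)).sum := by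
        apply congrArg List.sum
        apply List.map_congr_left
        intro i _
        exact sum_swap _ _ _
    _ = (dirsB.map (fun d =>
          ((PySem.List.pyRange 0 rows 1).map (fun i =>
            ((PySem.List.pyRange 0 cols 1).map (fun j =>
              if cellAt board i j = "@" ∧ (i + d.1, j + d.2) = p then (1:Int) else 0)).sum)).sum)).sum := by
        exact sum_swap _ _ _
    _ = (dirsB.map (fun d => indOf board rows cols (p.1 - d.1) (p.2 - d.2))).sum := by
        apply congrArg List.sum
        apply List.map_congr_left
        intro d _
        have inner : ∀ i, ((PySem.List.pyRange 0 cols 1).map (fun j =>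
              if cellAt board i j = "@" ∧ (i + d.1, j + d.2) = p then (1:Int) else 0)).sum
            = if i = p.1 - d.1 then
                (if 0 ≤ p.2 - d.2 ∧ p.2 - d.2 < cols then
                  (if cellAt board i (p.2 - d.2) = "@" then (1:Int) else 0) else 0)
              else 0 := by
          intro i
          by_cases hi : i = p.1 - d.1
          · rw [if_pos hi]
            have e : ((PySem.List.pyRange 0 cols 1).map (fun j =>
                if cellAt board i j = "@" ∧ (i + d.1, j + d.2) = p then (1:Int) else 0))
                = ((PySem.List.pyRange 0 cols 1).map (fun j =>
                    if j = p.2 - d.2 then (if cellAt board i j = "@" then (1:Int) else 0) else 0)) := by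
              apply List.map_congr_left
              intro j _
              obtain ⟨p1, p2⟩ := p
              by_cases hj : j = p2 - d.2
              · rw [if_pos hj]
                by_cases hc : cellAt board i j = "@"
                · rw [if_pos hc, if_pos ⟨hc, by simp; omega⟩]
                · rw [if_neg hc, if_neg (by tauto)]
              · rw [if_neg hj, if_neg (by rintro ⟨-, h⟩; simp at h; omega)]
            rw [e, pr_delta]
          · rw [if_neg hi]
            have e : ∀ j, (if cellAt board i j = "@" ∧ (i + d.1, j + d.2) = p then (1:Int) else 0) = 0 := by
              intro j
              rw [if_neg (by rintro ⟨-, h⟩; obtain ⟨p1, p2⟩ := p; simp at h; omega)]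
            simp only [e, List.map_const']
            simp
        have e2 : ((PySem.List.pyRange 0 rows 1).map (fun i =>
            ((PySem.List.pyRange 0 cols 1).map (fun j =>
              if cellAt board i j = "@" ∧ (i + d.1, j + d.2) = p then (1:Int) else 0)).sum))
            = ((PySem.List.pyRange 0 rows 1).map (fun i =>
                if i = p.1 - d.1 then
                  (if 0 ≤ p.2 - d.2 ∧ p.2 - d.2 < cols then
                    (if cellAt board i (p.2 - d.2) = "@" then (1:Int) else 0) else 0)
                else 0)) := List.map_congr_left (fun i _ => inner i)
        rw [e2, pr_delta]
        unfold indOf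
        split_ifs <;> first | rfl | omega | tauto
theorem dirs_symm (board : List (List String)) (rows cols i j : Int) :
    (dirsB.map (fun d => indOf board rows cols (i - d.1) (j - d.2))).sum
      = (directionsA.map (fun d => indOf board rows cols (i + d.1) (j + d.2))).sum := by
  simp only [dirsB, directionsA, List.map_cons, List.map_nil, List.sum_cons, List.sum_nil]
  norm_num
  ring_nf
theorem key_cell (board : List (List String)) (i j : Int) :
    is_able_to_access board i j
      = decide (cellAt board i j = "@" ∧
          (((PySem.List.pyRange 0 (PySem.List.len board) 1).flatMap (fun i' =>
            (PySem.List.pyRange 0 (PySem.List.len (PySem.List.pyGetD board 0 [])) 1).flatMap (fun j' =>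
              if cellAt board i' j' = "@" then dirsB.map (fun d => (i' + d.1, j' + d.2)) else []))).foldl
            (fun d q => d.modify q 0 (· + 1)) PySem.Dict.empty : PySem.Dict (Int × Int) Int).getD (i, j) 0 < 4) := by
  unfold is_able_to_access
  by_cases hc : cellAt board i j = "@"
  · rw [if_neg (by simpa using hc), accessLoop_eq, zero_add, decide_eq_decide]
    simp only [PySem.Dict.getD_foldl_modify_add_one, PySem.Dict.getD_empty, zero_add]
    rw [count_contribs board (PySem.List.len board) (PySem.List.len (PySem.List.pyGetD board 0 [])) (i, j)]
    rw [dirs_symm board _ _ i j]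
    exact ⟨fun h => ⟨hc, h⟩, fun h => h.2⟩
  · rw [if_pos (by simpa using hc)]
    symm
    rw [decide_eq_false_iff_not]
    tauto

-- ===== VERDICT (by name: the statement is the Claim_ definition above) =====
theorem remove_accessible_rolls_spec : Claim_equal_remove_accessible_rolls := by
  intro board _ _
  show remove_accessible_rolls board = remove_accessible_rolls_alt board
  simp only [remove_accessible_rolls, remove_accessible_rolls_alt]
  rw [PySem.List.foldl_congr_mem (PySem.List.pyRange 0 (PySem.List.len board) 1)
    (fun (acc : List (Int × Int)) (i : Int) =>
      (PySem.List.pyRange 0 (PySem.List.len (PySem.List.pyGetD board 0 [])) 1).foldl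
        (fun acc j => if is_able_to_access board i j then acc ++ [(i, j)] else acc) acc)
    (fun (acc : List (Int × Int)) (i : Int) =>
      acc ++ ((PySem.List.pyRange 0 (PySem.List.len (PySem.List.pyGetD board 0 [])) 1).filter
        (fun j => is_able_to_access board i j)).map (fun j => (i, j)))
    []
    (fun acc i _ => PySem.List.foldl_append_if _ _ _ _)]
  rw [PySem.List.foldl_append_eq_flatMap, List.nil_append, List.length_flatMap, cast_list_sum,
    List.map_map]
  rw [PySem.List.foldl_congr_mem (PySem.List.pyRange 0 (PySem.List.len board) 1)
    (fun (acc : Int) (i : Int) =>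
      (PySem.List.pyRange 0 (PySem.List.len (PySem.List.pyGetD board 0 [])) 1).foldl
        (fun acc j =>
          if cellAt board i j = "@" ∧
              (((PySem.List.pyRange 0 (PySem.List.len board) 1).flatMap (fun i' =>
                (PySem.List.pyRange 0 (PySem.List.len (PySem.List.pyGetD board 0 [])) 1).flatMap (fun j' =>
                  if cellAt board i' j' = "@" then dirsB.map (fun d => (i' + d.1, j' + d.2)) else []))).foldl
                (fun d q => d.modify q 0 (· + 1)) PySem.Dict.empty : PySem.Dict (Int × Int) Int).getD (i, j) 0 < 4
          then acc + 1 else acc) acc)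
    (fun (acc : Int) (i : Int) =>
      acc + (((PySem.List.pyRange 0 (PySem.List.len (PySem.List.pyGetD board 0 [])) 1).countP
        (fun j => decide (cellAt board i j = "@" ∧
          (((PySem.List.pyRange 0 (PySem.List.len board) 1).flatMap (fun i' =>
            (PySem.List.pyRange 0 (PySem.List.len (PySem.List.pyGetD board 0 [])) 1).flatMap (fun j' =>
              if cellAt board i' j' = "@" then dirsB.map (fun d => (i' + d.1, j' + d.2)) else []))).foldl
            (fun d q => d.modify q 0 (· + 1)) PySem.Dict.empty : PySem.Dict (Int × Int) Int).getD (i, j) 0 < 4))) : Int))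
    0
    (fun acc i _ => PySem.List.foldl_ite_add_one _ _ _)]
  rw [PySem.List.foldl_add, zero_add]
  apply congrArg List.sum
  apply List.map_congr_left
  intro i _
  simp only [Function.comp_apply, List.length_map]
  rw [← List.countP_eq_length_filter]
  apply congrArg Nat.cast
  apply List.countP_congr
  intro j _
  rw [key_cell]
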